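-- pv_equiv track=rewrite | github.com/Ra0ul/Algorithm | 프로그래머스/unrated/181893. 배열 조각하기/배열 조각하기.py | solution
-- ===== SOURCE A (Python) =====
-- def solution(arr, query):
--     answer = []
--     for i, j in enumerate(query):
--         if i%2:
--             arr = arr[j:]
--         else:
--             arr = arr[:j+1]
--     return arr
-- ===== SOURCE B (Python) =====
-- def _norm(k, n):
--     # Python slice-bound normalization for a list of length n
--     if k < 0:
--         k += n
--     return 0 if k < 0 else (n if k > n else k)
--
--
-- def solution(arr, query):
--     lo, hi = 0, len(arr)
--     for i, j in enumerate(query):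
--         n = hi - lo
--         if i % 2:
--             lo += _norm(j, n)
--         else:
--             hi = lo + _norm(j + 1, n)
--     return arr[lo:hi]
-- ===== Notes on version B (the rewrite author's own statement) =====
-- stated objective: alternative
-- what changed: Instead of materializing a new list slice for each query, B tracks the current window as a pair of offsets (lo, hi) updated in one pass over the queries (normalizing each bound the way Python slicing does) and slices the array exactly once at the end.
import Mathlib
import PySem

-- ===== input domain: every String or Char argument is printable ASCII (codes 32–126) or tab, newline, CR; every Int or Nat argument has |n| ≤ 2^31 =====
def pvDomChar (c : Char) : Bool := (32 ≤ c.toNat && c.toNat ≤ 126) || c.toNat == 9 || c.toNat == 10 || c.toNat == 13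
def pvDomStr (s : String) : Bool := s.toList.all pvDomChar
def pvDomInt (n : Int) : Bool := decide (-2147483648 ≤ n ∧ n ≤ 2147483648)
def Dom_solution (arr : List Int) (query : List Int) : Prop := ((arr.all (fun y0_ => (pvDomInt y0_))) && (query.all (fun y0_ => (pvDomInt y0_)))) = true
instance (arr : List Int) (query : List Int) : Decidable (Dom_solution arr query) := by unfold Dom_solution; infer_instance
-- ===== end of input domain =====

-- B replaces A's repeated materialized list slices (one new list per query) by tracking
-- the two window offsets in one pass over the queries and slicing once at the end.

-- ===== PORT A =====
-- loop body of 'for i, j in enumerate(query)'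
def stepA (a : List Int) (p : Int × Int) : List Int :=
  if p.1 % 2 ≠ 0 then PySem.List.slice a (some p.2) none
  else PySem.List.slice a none (some (p.2 + 1))

def solution (arr : List Int) (query : List Int) : List Int :=
  (PySem.List.enumerate query 0).foldl stepA arr

-- ===== PORT B =====
-- Source B's _norm: Python slice-bound normalization for a window of length n
def pvNorm (k : Int) (n : Nat) : Nat :=
  let k' := if k < 0 then k + n else k
  if k' < 0 then 0 else if k' > (n : Int) then n else k'.toNat

-- loop body: state is the (lo, hi) window into the original list
def stepB (s : Nat × Nat) (p : Int × Int) : Nat × Nat :=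
  let n := s.2 - s.1
  if p.1 % 2 ≠ 0 then (s.1 + pvNorm p.2 n, s.2)
  else (s.1, s.1 + pvNorm (p.2 + 1) n)

def solution_alt (arr : List Int) (query : List Int) : List Int :=
  let lh := (PySem.List.enumerate query 0).foldl stepB (0, arr.length)
  PySem.List.slice arr (some (lh.1 : Int)) (some (lh.2 : Int))

-- ===== PRECONDITION & SPEC =====
def Spec_solution (arr : List Int) (query : List Int) (out : List Int) : Prop := out = solution_alt arr query
instance (arr : List Int) (query : List Int) (out : List Int) : Decidable (Spec_solution arr query out) := by unfold Spec_solution; infer_instance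

-- ===== CLAIM (what is proved, stated in full; the proofs are below) =====
def Claim_equal_solution : Prop := ∀ (arr : List Int) (query : List Int), Dom_solution arr query → Spec_solution arr query (solution arr query)

-- ===== LEMMAS AND PROOFS =====

theorem pvNorm_eq_clampIdx (k : Int) (n : Nat) : pvNorm k n = PySem.List.clampIdx n k := by
  simp [pvNorm, PySem.List.clampIdx]
  split_ifs <;> omega

theorem pvNorm_le (k : Int) (n : Nat) : pvNorm k n ≤ n := by
  rw [pvNorm_eq_clampIdx]; exact PySem.List.clampIdx_le n k

theorem slice_to_norm (xs : List Int) (b : Int) :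
    PySem.List.slice xs none (some b) = xs.take (pvNorm b xs.length) := by
  rw [pvNorm_eq_clampIdx]; simp [PySem.List.slice]

theorem slice_from_norm (xs : List Int) (a : Int) :
    PySem.List.slice xs (some a) none = xs.drop (pvNorm a xs.length) := by
  rw [pvNorm_eq_clampIdx]; exact PySem.List.slice_some_none xs a

theorem loop_eq (query : List Int) : ∀ (i : Int) (arr0 : List Int) (lo hi : Nat),
    lo ≤ hi → hi ≤ arr0.length →
    let lh := (PySem.List.enumerate query i).foldl stepB (lo, hi)
    lh.1 ≤ lh.2 ∧ lh.2 ≤ arr0.length ∧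
      (PySem.List.enumerate query i).foldl stepA ((arr0.drop lo).take (hi - lo))
        = (arr0.drop lh.1).take (lh.2 - lh.1) := by
  induction query with
  | nil => intro i arr0 lo hi h1 h2; simpa [PySem.List.enumerate_nil] using ⟨h1, h2⟩
  | cons x rest ih =>
    intro i arr0 lo hi h1 h2
    have hlen : ((arr0.drop lo).take (hi - lo)).length = hi - lo := by
      simp [List.length_take, List.length_drop]; omega
    rw [PySem.List.enumerate_cons]
    simp only [List.foldl_cons]
    by_cases hpar : i % 2 ≠ 0
    · -- odd index: arr = arr[j:]  /  lo moves right
      have hA : stepA ((arr0.drop lo).take (hi - lo)) (i, x)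
          = (arr0.drop (lo + pvNorm x (hi - lo))).take (hi - (lo + pvNorm x (hi - lo))) := by
        have hle := pvNorm_le x (hi - lo)
        simp only [stepA, slice_from_norm, hlen, List.drop_take, List.drop_drop]
        rw [if_pos hpar]
        congr 1
        omega
      have hB : stepB (lo, hi) (i, x) = (lo + pvNorm x (hi - lo), hi) := by
        simp [stepB, hpar]
      rw [hA, hB]
      exact ih (i + 1) arr0 (lo + pvNorm x (hi - lo)) hi
        (by have := pvNorm_le x (hi - lo); omega) h2
    · -- even index: arr = arr[:j+1]  /  hi moves left
      have hle := pvNorm_le (x + 1) (hi - lo)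
      have hA : stepA ((arr0.drop lo).take (hi - lo)) (i, x)
          = (arr0.drop lo).take ((lo + pvNorm (x + 1) (hi - lo)) - lo) := by
        simp only [stepA, slice_to_norm, hlen, List.take_take]
        rw [if_neg hpar]
        congr 1
        omega
      have hB : stepB (lo, hi) (i, x) = (lo, lo + pvNorm (x + 1) (hi - lo)) := by
        simp [stepB, hpar]
      rw [hA, hB]
      exact ih (i + 1) arr0 lo (lo + pvNorm (x + 1) (hi - lo)) (by omega) (by omega)

-- ===== VERDICT (by name: the statement is the Claim_ definition above) =====
theorem solution_spec : Claim_equal_solution := by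
  intro arr query _
  have h := loop_eq query 0 arr 0 arr.length (Nat.zero_le _) (le_refl _)
  simp only at h
  obtain ⟨-, -, h3⟩ := h
  unfold Spec_solution solution solution_alt
  simp only [PySem.List.slice_natCast]
  rw [← h3]
  simp
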